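-- pv_equiv track=rewrite | github.com/dymmond/palfrey | palfrey/protocols/http.py | _is_websocket_upgrade
-- ===== SOURCE A (Python) =====
-- def _is_websocket_upgrade(headers: list[tuple[str, str]]) -> bool:
--     """Checks headers to determine if the client is requesting a WebSocket upgrade."""
--     upgrade = ""
--     connection = ""
--     for name, value in headers:
--         lowered_name = name.lower()
--         lowered_value = value.lower()
--         if lowered_name == "upgrade":
--             upgrade = lowered_value
--         elif lowered_name == "connection":
--             connection = lowered_value
--     return "websocket" in upgrade and "upgrade" in connection
-- ===== SOURCE B (Python) =====
-- def _is_websocket_upgrade(headers: list[tuple[str, str]]) -> bool: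
--     """Checks headers to determine if the client is requesting a WebSocket upgrade."""
--     def last_value(key):
--         # Search back-to-front: the first match from the end is the last
--         # occurrence, which is what a forward overwrite would keep.
--         for name, value in reversed(headers):
--             if name.lower() == key:
--                 return value.lower()
--         return ""
--     return "websocket" in last_value("upgrade") and "upgrade" in last_value("connection")
-- ===== Notes on version B (the rewrite author's own statement) =====
-- stated objective: alternative
-- what changed: Replaces A's forward fold that accumulates two scalar variables over every header with two backward early-exit searches (first match from the end = last occurrence), which never lowercase values of non-matching headers.
import Mathlib
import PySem

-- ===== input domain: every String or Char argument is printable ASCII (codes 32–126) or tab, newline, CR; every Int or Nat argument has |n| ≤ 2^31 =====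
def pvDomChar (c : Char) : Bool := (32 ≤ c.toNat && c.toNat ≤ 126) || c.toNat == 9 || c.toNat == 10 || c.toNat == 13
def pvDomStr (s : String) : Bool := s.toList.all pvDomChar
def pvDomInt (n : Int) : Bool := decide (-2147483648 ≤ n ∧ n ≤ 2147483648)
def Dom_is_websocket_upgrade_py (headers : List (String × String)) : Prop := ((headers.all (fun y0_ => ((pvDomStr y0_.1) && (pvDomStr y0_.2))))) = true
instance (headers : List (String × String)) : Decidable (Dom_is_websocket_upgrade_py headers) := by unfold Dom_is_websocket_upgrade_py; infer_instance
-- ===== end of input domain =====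

-- B replaces A's forward two-scalar fold by two backward early-exit searches for the last "upgrade"/"connection" headers; objective: alternative.


-- ===== PORT A =====
def is_websocket_upgrade_py (headers : List (String × String)) : Bool :=
  let st := headers.foldl (fun (st : String × String) nv =>
    let lowered_name := PySem.Str.lower nv.1
    let lowered_value := PySem.Str.lower nv.2
    if lowered_name = "upgrade" then (lowered_value, st.2)
    else if lowered_name = "connection" then (st.1, lowered_value)
    else st) ("", "")
  PySem.Str.isIn "websocket" st.1 && PySem.Str.isIn "upgrade" st.2

-- ===== PORT B =====
-- B's inner loop: scan a list (B feeds it the reversed headers), return the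
-- lowered value of the first header whose lowered name equals `key`, else "".
def pvLastValueScan (key : String) : List (String × String) → String
  | [] => ""
  | nv :: rest =>
      if PySem.Str.lower nv.1 = key then PySem.Str.lower nv.2
      else pvLastValueScan key rest

def is_websocket_upgrade_py_alt (headers : List (String × String)) : Bool :=
  PySem.Str.isIn "websocket" (pvLastValueScan "upgrade" headers.reverse) &&
    PySem.Str.isIn "upgrade" (pvLastValueScan "connection" headers.reverse)

-- ===== PRECONDITION & SPEC =====
def Spec_is_websocket_upgrade_py (headers : List (String × String)) (out : Bool) : Prop := out = is_websocket_upgrade_py_alt headers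
instance (headers : List (String × String)) (out : Bool) : Decidable (Spec_is_websocket_upgrade_py headers out) := by unfold Spec_is_websocket_upgrade_py; infer_instance

-- ===== CLAIM (what is proved, stated in full; the proofs are below) =====
def Claim_equal_is_websocket_upgrade_py : Prop := ∀ (headers : List (String × String)), Dom_is_websocket_upgrade_py headers → Spec_is_websocket_upgrade_py headers (is_websocket_upgrade_py headers)

-- ===== LEMMAS AND PROOFS =====

-- A's forward fold from ("","") computes exactly B's backward first-match scans:
-- shown by induction from the end of the list, where the fold applies its step to
-- the appended header last while the backward scan inspects that header first.
theorem pv_fold_eq_scan (headers : List (String × String)) :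
    headers.foldl (fun (st : String × String) nv =>
      let lowered_name := PySem.Str.lower nv.1
      let lowered_value := PySem.Str.lower nv.2
      if lowered_name = "upgrade" then (lowered_value, st.2)
      else if lowered_name = "connection" then (st.1, lowered_value)
      else st) ("", "") =
    (pvLastValueScan "upgrade" headers.reverse,
     pvLastValueScan "connection" headers.reverse) := by
  induction headers using List.reverseRecOn with
  | nil => simp [pvLastValueScan]
  | append_singleton l nv ih =>
    rw [List.foldl_append, ih]
    simp only [List.foldl_cons, List.foldl_nil, List.reverse_append,
      List.reverse_singleton, List.singleton_append, pvLastValueScan]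
    by_cases h1 : PySem.Str.lower nv.1 = "upgrade" <;>
      by_cases h2 : PySem.Str.lower nv.1 = "connection" <;>
      simp [h1, h2]

-- ===== VERDICT (by name: the statement is the Claim_ definition above) =====
theorem is_websocket_upgrade_py_spec : Claim_equal_is_websocket_upgrade_py := by
  intro headers _
  unfold Spec_is_websocket_upgrade_py is_websocket_upgrade_py is_websocket_upgrade_py_alt
  rw [pv_fold_eq_scan]
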